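-- pv_equiv track=rewrite | github.com/uas-at-ucla/suas-2019 | src/vision/target_analysis/classify_target.py | classifyColor
-- ===== SOURCE A (Python) =====
-- def classifyColor(hue):
--     hue = int(hue)
--     cdict = {
--         'red': range(-7, 15),
--         'orange': range(15, 23),
--         'yellow': range(23, 38),
--         'green': range(38, 83),
--         'blue': range(83, 135),
--         'purple': range(135, 150),
--         'magenta': range(150, 173),
--     }
--
--     while(hue >= 173):
--         hue -= 180
--     while(hue < -7):
--         hue += 180
--
--     for color in cdict:
--         if hue in cdict[color]:
--             return color
--
--     return None
-- ===== SOURCE B (Python) =====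
-- def classifyColor(hue):
--     hue = ((int(hue) + 7) % 180) - 7
--     boundaries = [-7, 15, 23, 38, 83, 135, 150, 173]
--     names = ['red', 'orange', 'yellow', 'green', 'blue', 'purple', 'magenta']
--     lo, hi = 0, len(boundaries)
--     while lo < hi:
--         mid = (lo + hi) // 2
--         if hue < boundaries[mid]:
--             hi = mid
--         else:
--             lo = mid + 1
--     i = lo - 1
--     return names[i] if 0 <= i < len(names) else None
-- ===== Notes on version B (the rewrite author's own statement) =====
-- stated objective: alternative
-- what changed: Replaces the two normalization while-loops by a single closed-form modulo and the linear dict-of-ranges scan by a binary search over a sorted boundary table with a parallel name list.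
import Mathlib
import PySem

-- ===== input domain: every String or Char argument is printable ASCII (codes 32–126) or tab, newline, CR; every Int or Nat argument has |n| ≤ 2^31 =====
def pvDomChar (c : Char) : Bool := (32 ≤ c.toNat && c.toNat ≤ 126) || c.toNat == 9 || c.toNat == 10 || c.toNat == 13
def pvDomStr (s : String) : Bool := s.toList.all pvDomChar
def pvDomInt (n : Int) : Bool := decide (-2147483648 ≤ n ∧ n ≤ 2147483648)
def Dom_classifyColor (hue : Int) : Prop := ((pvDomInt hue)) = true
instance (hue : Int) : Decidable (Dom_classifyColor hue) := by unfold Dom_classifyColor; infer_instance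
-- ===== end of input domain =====

-- B replaces A's two while-loops by one closed-form modulo and the linear range scan
-- by a binary search over a sorted boundary table (alternative decomposition, same cost class).

-- ===== PORT A =====
-- while(hue >= 173): hue -= 180
def pvWhileSub (h : Int) : Int :=
  if h ≥ 173 then pvWhileSub (h - 180) else h
termination_by (h - 172).toNat
decreasing_by omega

-- while(hue < -7): hue += 180
def pvWhileAdd (h : Int) : Int :=
  if h < -7 then pvWhileAdd (h + 180) else h
termination_by (-7 - h).toNat
decreasing_by omega

-- the dict of ranges, in insertion order: (color, range start, range stop)
def pvCDict : List (String × Int × Int) :=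
  [("red", -7, 15), ("orange", 15, 23), ("yellow", 23, 38), ("green", 38, 83),
   ("blue", 83, 135), ("purple", 135, 150), ("magenta", 150, 173)]

-- for color in cdict: if hue in cdict[color]: return color  (hue in range(a,b) ↔ a ≤ hue < b)
def pvScan (h : Int) : List (String × Int × Int) → Option String
  | [] => none
  | (name, a, b) :: rest => if a ≤ h ∧ h < b then some name else pvScan h rest

def classifyColor (hue : Int) : Option String :=
  pvScan (pvWhileAdd (pvWhileSub hue)) pvCDict

-- ===== PORT B =====
-- while lo < hi: mid = (lo+hi)//2; if hue < boundaries[mid]: hi = mid else: lo = mid+1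
-- (boundaries[mid] read with default 0; mid is always in range in the call made below)
-- fuel = hi - lo bounds the iteration count (the interval shrinks by ≥ 1 each step)
def pvBisectGo (bs : List Int) (h : Int) : Int → Int → Nat → Int
  | lo, _, 0 => lo
  | lo, hi, fuel + 1 =>
    if lo < hi then
      let mid := PySem.Int.floordiv (lo + hi) 2
      if h < PySem.List.pyGetD bs mid 0 then pvBisectGo bs h lo mid fuel
      else pvBisectGo bs h (mid + 1) hi fuel
    else lo

def pvBisect (bs : List Int) (h : Int) (lo hi : Int) : Int :=
  pvBisectGo bs h lo hi (hi - lo).toNat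

def pvBoundaries : List Int := [-7, 15, 23, 38, 83, 135, 150, 173]
def pvNames : List String := ["red", "orange", "yellow", "green", "blue", "purple", "magenta"]

def classifyColor_alt (hue : Int) : Option String :=
  let h := PySem.Int.mod (hue + 7) 180 - 7
  let i := pvBisect pvBoundaries h 0 8 - 1
  if 0 ≤ i ∧ i < 7 then PySem.List.pyGet? pvNames i else none

-- ===== PRECONDITION & SPEC =====
def Spec_classifyColor (hue : Int) (out : Option String) : Prop := out = classifyColor_alt hue
instance (hue : Int) (out : Option String) : Decidable (Spec_classifyColor hue out) := by unfold Spec_classifyColor; infer_instance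

-- ===== CLAIM (what is proved, stated in full; the proofs are below) =====
def Claim_equal_classifyColor : Prop := ∀ (hue : Int), Dom_classifyColor hue → Spec_classifyColor hue (classifyColor hue)

-- ===== LEMMAS AND PROOFS =====

theorem pvWhileSub_spec (h : Int) : pvWhileSub h < 173 ∧ (pvWhileSub h + 7) % 180 = (h + 7) % 180 := by
  induction h using pvWhileSub.induct with
  | case1 h hge ih =>
      rw [pvWhileSub, if_pos hge]
      exact ⟨ih.1, by omega⟩
  | case2 h hlt =>
      rw [pvWhileSub, if_neg hlt]
      exact ⟨by omega, rfl⟩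

theorem pvWhileAdd_spec (h : Int) (hlt : h < 173) :
    -7 ≤ pvWhileAdd h ∧ pvWhileAdd h < 173 ∧ (pvWhileAdd h + 7) % 180 = (h + 7) % 180 := by
  induction h using pvWhileAdd.induct with
  | case1 h hneg ih =>
      rw [pvWhileAdd, if_pos hneg]
      have := ih (by omega)
      exact ⟨this.1, this.2.1, by omega⟩
  | case2 h hge =>
      rw [pvWhileAdd, if_neg hge]
      exact ⟨by omega, hlt, rfl⟩

theorem pvNorm_eq (h : Int) : pvWhileAdd (pvWhileSub h) = (h + 7) % 180 - 7 := by
  have h1 := pvWhileSub_spec h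
  have h2 := pvWhileAdd_spec (pvWhileSub h) h1.1
  omega

-- both sides as a function of the normalized hue, checked on all 180 residues
set_option maxRecDepth 10000 in
theorem pvBucket_eq (k : Fin 180) :
    pvScan ((k : Int) - 7) pvCDict =
      (let i := pvBisect pvBoundaries ((k : Int) - 7) 0 8 - 1
       if 0 ≤ i ∧ i < 7 then PySem.List.pyGet? pvNames i else none) := by
  revert k
  decide

-- ===== VERDICT (by name: the statement is the Claim_ definition above) =====
theorem classifyColor_spec : Claim_equal_classifyColor := by
  intro hue _
  unfold Spec_classifyColor classifyColor classifyColor_alt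
  rw [pvNorm_eq]
  have hmod : PySem.Int.mod (hue + 7) 180 = (hue + 7) % 180 :=
    PySem.Int.mod_eq_emod_of_pos (by omega)
  rw [hmod]
  have hb : 0 ≤ (hue + 7) % 180 ∧ (hue + 7) % 180 < 180 := by omega
  have := pvBucket_eq ⟨((hue + 7) % 180).toNat, by omega⟩
  have hcast : ((((hue + 7) % 180).toNat : Nat) : Int) - 7 = (hue + 7) % 180 - 7 := by omega
  rw [hcast] at this
  exact this
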